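-- pv_equiv track=rewrite | github.com/KatherinAllin28/parcial3_SO_KatherinAllin | sim_algo_reem_mem.py | procesar
-- ===== SOURCE A (Python) =====
-- from collections import deque
--
-- def procesar(segmentos, reqs, marcos_libres):
--     tamanio_pagina = 16
--     tabla_paginas = {}
--     cola_marcos = deque(marcos_libres)
--     uso_fifo = deque()
--     resultados = []
--
--     tabla_segmentos = {}
--     for nombre, base, limite in segmentos:
--         tabla_segmentos[nombre] = (base, base + limite - 1)
--
--     for req in reqs:
--         segmento_encontrado = None
--         for nombre, (inicio, fin) in tabla_segmentos.items():
--             if inicio <= req <= fin: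
--                 segmento_encontrado = nombre
--                 base_segmento = inicio
--                 break
--
--         if not segmento_encontrado:
--             resultados.append((req, 0x1FF, "Segmention Fault"))
--             break
--
--         offset = req - base_segmento
--         nro_pagina = offset // tamanio_pagina
--         offset_en_pagina = offset % tamanio_pagina
--         clave_pagina = (segmento_encontrado, nro_pagina)
--
--         if clave_pagina in tabla_paginas:
--             marco = tabla_paginas[clave_pagina]
--             direccion_fisica = marco * tamanio_pagina + offset_en_pagina
--             resultados.append((req, direccion_fisica, "Marco ya estaba asignado"))
--         else:
--             if cola_marcos:
--                 marco = cola_marcos.popleft()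
--                 accion = "Marco libre asignado"
--             else:
--                 pagina_reemplazada = uso_fifo.popleft()
--                 marco = tabla_paginas.pop(pagina_reemplazada)
--                 accion = "Marco asignado"
--
--             tabla_paginas[clave_pagina] = marco
--             uso_fifo.append(clave_pagina)
--             direccion_fisica = marco * tamanio_pagina + offset_en_pagina
--             resultados.append((req, direccion_fisica, accion))
--
--     return resultados
-- ===== SOURCE B (Python) =====
-- def procesar(segmentos, reqs, marcos_libres):
--     PAGINA = 16
--     # effective segment table: last (base, limite) per name, in first-insertion order
--     tabla = {}
--     for nombre, base, limite in segmentos: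
--         tabla[nombre] = (base, base + limite - 1)
--     segs = list(tabla.items())
--     L = len(marcos_libres)
--     carga = {}   # page -> index of the fault that loaded it (may be stale)
--     fallos = 0   # total page faults so far
--     out = []
--     for req in reqs:
--         nombre = None
--         for n, (ini, fin) in segs:
--             if ini <= req <= fin:
--                 nombre, base = n, ini
--                 break
--         if not nombre:   # no usable segment (an empty name counts as no segment)
--             out.append((req, 0x1FF, "Segmention Fault"))
--             break
--         off = req - base
--         clave = (nombre, off // PAGINA)
--         idx = carga.get(clave)
--         if idx is not None and idx >= fallos - L:
--             # page loaded at fault idx is still resident; FIFO hands out frames cyclically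
--             out.append((req, marcos_libres[idx % L] * PAGINA + off % PAGINA,
--                         "Marco ya estaba asignado"))
--         else:
--             accion = "Marco libre asignado" if fallos < L else "Marco asignado"
--             out.append((req, marcos_libres[fallos % L] * PAGINA + off % PAGINA, accion))
--             carga[clave] = fallos
--             fallos += 1
--     return out
-- ===== Notes on version B (the rewrite author's own statement) =====
-- stated objective: alternative
-- what changed: B drops A's deque-based FIFO machinery (free-frame queue, FIFO eviction queue, page-table pop) and instead assigns frames by the closed form marcos_libres[fault_index % L] with a load-index residency test (a page loaded at fault i is resident iff i >= fallos - L), keeping only a fault counter and a load-index dict.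
import Mathlib
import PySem

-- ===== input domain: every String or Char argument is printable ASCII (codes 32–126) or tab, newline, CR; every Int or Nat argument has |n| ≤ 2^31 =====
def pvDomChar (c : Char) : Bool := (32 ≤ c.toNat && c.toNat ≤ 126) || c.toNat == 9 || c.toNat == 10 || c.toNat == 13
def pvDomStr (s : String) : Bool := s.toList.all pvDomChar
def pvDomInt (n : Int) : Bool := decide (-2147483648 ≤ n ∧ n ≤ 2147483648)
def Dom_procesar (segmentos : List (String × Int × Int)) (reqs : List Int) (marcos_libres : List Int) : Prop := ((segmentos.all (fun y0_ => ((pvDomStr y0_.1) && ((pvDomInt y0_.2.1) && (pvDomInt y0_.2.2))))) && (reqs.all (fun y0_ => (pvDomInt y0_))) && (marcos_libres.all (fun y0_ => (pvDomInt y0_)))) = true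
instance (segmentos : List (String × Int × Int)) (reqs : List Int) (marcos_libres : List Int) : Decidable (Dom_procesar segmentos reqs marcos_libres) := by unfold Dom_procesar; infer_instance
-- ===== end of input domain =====

-- B replaces A's deque-based FIFO machinery (free-frame queue, FIFO queue, page-table pop) by a
-- closed-form cyclic frame assignment marcos_libres[fault_index % L] plus a load-index residency
-- test (objective: alternative, same asymptotic cost).

-- ===== PORT A =====

-- tabla_segmentos = {nombre: (base, base+limite-1)} — identical code in both Pythons, shared helper
def dictSegs (segmentos : List (String × Int × Int)) : PySem.Dict String (Int × Int) :=
  segmentos.foldl (fun d p => d.insert p.1 (p.2.1, p.2.1 + p.2.2 - 1)) PySem.Dict.empty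

-- inner first-match scan over tabla_segmentos.items() with break — identical in both Pythons
def findSeg : List (String × (Int × Int)) → Int → Option (String × Int)
  | [], _ => none
  | p :: rest, req =>
    if p.2.1 ≤ req ∧ req ≤ p.2.2 then some (p.1, p.2.1) else findSeg rest req

-- A's main loop: state = (tabla_paginas, cola_marcos, uso_fifo); break → return and stop
def loopA (items : List (String × (Int × Int))) :
    List Int → PySem.Dict (String × Int) Int → List Int → List (String × Int) →
    List (Int × Int × String)
  | [], _, _, _ => []
  | req :: rest, tp, cola, fifo =>
    match findSeg items req with
    | none => [(req, 511, "Segmention Fault")]                 -- not segmento_encontrado (None)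
    | some (nombre, base) =>
      if nombre = "" then [(req, 511, "Segmention Fault")]     -- not segmento_encontrado ("" is falsy)
      else
        let offset := req - base
        let clave : String × Int := (nombre, PySem.Int.floordiv offset 16)
        let offp := PySem.Int.mod offset 16
        match tp.get? clave with
        | some marco =>
            (req, marco * 16 + offp, "Marco ya estaba asignado") :: loopA items rest tp cola fifo
        | none =>
          match cola with
          | m :: cs =>
              (req, m * 16 + offp, "Marco libre asignado") ::
                loopA items rest (tp.insert clave m) cs (fifo ++ [clave])
          | [] =>
            match fifo with
            | [] => []                                         -- Python: IndexError (outside Pre_)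
            | v :: fs =>
              match tp.get? v with
              | none => []                                     -- Python: KeyError (unreachable)
              | some marco =>
                  (req, marco * 16 + offp, "Marco asignado") ::
                    loopA items rest ((tp.erase v).insert clave marco) [] (fs ++ [clave])

def procesar (segmentos : List (String × Int × Int)) (reqs : List Int) (marcos_libres : List Int) : List (Int × Int × String) :=
  loopA (dictSegs segmentos).items reqs PySem.Dict.empty marcos_libres []

-- ===== PORT B =====

-- B's main loop: state = (carga : page -> loading fault index, fallos : fault counter)
def loopB (items : List (String × (Int × Int))) (marcos : List Int) (L : Int) :
    List Int → PySem.Dict (String × Int) Int → Int → List (Int × Int × String)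
  | [], _, _ => []
  | req :: rest, carga, fallos =>
    match findSeg items req with
    | none => [(req, 511, "Segmention Fault")]                 -- nombre stayed None
    | some (nombre, base) =>
      if nombre = "" then [(req, 511, "Segmention Fault")]     -- `if not nombre`: "" is falsy
      else
        let off := req - base
        let clave : String × Int := (nombre, PySem.Int.floordiv off 16)
        let offp := PySem.Int.mod off 16
        match carga.get? clave with
        | some idx =>
          if fallos - L ≤ idx then                             -- idx is not None and idx >= fallos - L
            match PySem.List.pyGet? marcos (PySem.Int.mod idx L) with
            | none => []                                       -- unreachable inside Pre_
            | some frame =>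
                (req, frame * 16 + offp, "Marco ya estaba asignado") :: loopB items marcos L rest carga fallos
          else
            match PySem.List.pyGet? marcos (PySem.Int.mod fallos L) with
            | none => []                                       -- Python: ZeroDivisionError when L = 0 (outside Pre_)
            | some frame =>
                (req, frame * 16 + offp, if fallos < L then "Marco libre asignado" else "Marco asignado") ::
                  loopB items marcos L rest (carga.insert clave fallos) (fallos + 1)
        | none =>
          match PySem.List.pyGet? marcos (PySem.Int.mod fallos L) with
          | none => []                                         -- Python: ZeroDivisionError when L = 0 (outside Pre_)
          | some frame =>
              (req, frame * 16 + offp, if fallos < L then "Marco libre asignado" else "Marco asignado") ::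
                loopB items marcos L rest (carga.insert clave fallos) (fallos + 1)

def procesar_alt (segmentos : List (String × Int × Int)) (reqs : List Int) (marcos_libres : List Int) : List (Int × Int × String) :=
  loopB (dictSegs segmentos).items marcos_libres (marcos_libres.length : Int) reqs PySem.Dict.empty 0

-- ===== PRECONDITION & SPEC =====

-- name of the effective segment (last definition per name, first-insertion order) containing r, if any
def dLookup (segmentos : List (String × Int × Int)) (r : Int) : Option String :=
  ((segmentos.foldl (fun d p => d.insert p.1 (p.2.1, p.2.1 + p.2.2 - 1)) PySem.Dict.empty).items.find?
      (fun q => decide (q.2.1 ≤ r ∧ r ≤ q.2.2))).map (fun q => q.1)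

-- Pre_ excludes exactly the inputs where A raises: no free frame exists and the first request falls
-- inside a segment with a non-empty name, so A's first page fault pops the empty deque (IndexError).
def Pre_procesar (segmentos : List (String × Int × Int)) (reqs : List Int) (marcos_libres : List Int) : Prop :=
  marcos_libres ≠ [] ∨ reqs = [] ∨ (reqs.head?.all (fun r => (dLookup segmentos r).all (fun n => n = ""))) = true
instance (segmentos : List (String × Int × Int)) (reqs : List Int) (marcos_libres : List Int) : Decidable (Pre_procesar segmentos reqs marcos_libres) := by unfold Pre_procesar; infer_instance

def pvWitness_procesar : (List (String × Int × Int)) × List Int × List Int :=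
  ([("a", 0, 16)], [3, 40], [1, 2])

def Spec_procesar (segmentos : List (String × Int × Int)) (reqs : List Int) (marcos_libres : List Int) (out : List (Int × Int × String)) : Prop := out = procesar_alt segmentos reqs marcos_libres
instance (segmentos : List (String × Int × Int)) (reqs : List Int) (marcos_libres : List Int) (out : List (Int × Int × String)) : Decidable (Spec_procesar segmentos reqs marcos_libres out) := by unfold Spec_procesar; infer_instance

-- ===== CLAIM (what is proved, stated in full; the proofs are below) =====
def Claim_equal_procesar : Prop := ∀ (segmentos : List (String × Int × Int)) (reqs : List Int) (marcos_libres : List Int), Dom_procesar segmentos reqs marcos_libres → Pre_procesar segmentos reqs marcos_libres → Spec_procesar segmentos reqs marcos_libres (procesar segmentos reqs marcos_libres)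

-- ===== LEMMAS AND PROOFS =====

def lastIdx {α : Type} [DecidableEq α] : List α → α → Option Nat
  | [], _ => none
  | a :: t, c =>
    match lastIdx t c with
    | some i => some (i + 1)
    | none => if a = c then some 0 else none

theorem lastIdx_eq_none_iff {α : Type} [DecidableEq α] (xs : List α) (c : α) :
    lastIdx xs c = none ↔ c ∉ xs := by
  induction xs with
  | nil => simp [lastIdx]
  | cons a t ih =>
    rw [lastIdx]
    rcases h : lastIdx t c with _ | i
    · by_cases hac : a = c
      · subst hac; simp
      · simp [ih.mp h, Ne.symm hac, hac]
    · have hcm : c ∈ t := by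
        by_contra hc
        rw [ih.mpr hc] at h; cases h
      simp [hcm]

theorem lastIdx_lt_length {α : Type} [DecidableEq α] (xs : List α) (c : α) (i : Nat)
    (h : lastIdx xs c = some i) : i < xs.length := by
  induction xs generalizing i with
  | nil => simp [lastIdx] at h
  | cons a t ih =>
    rw [lastIdx] at h
    rcases h2 : lastIdx t c with _ | j <;> rw [h2] at h <;> simp at h
    · obtain ⟨-, h⟩ := h; subst h; simp
    · subst h; have := ih j h2; simp; omega

theorem lastIdx_getElem {α : Type} [DecidableEq α] (xs : List α) (c : α) (i : Nat)
    (h : lastIdx xs c = some i) (hi : i < xs.length) : xs[i] = c := by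
  induction xs generalizing i with
  | nil => simp [lastIdx] at h
  | cons a t ih =>
    rw [lastIdx] at h
    rcases h2 : lastIdx t c with _ | j <;> rw [h2] at h <;> simp at h
    · obtain ⟨hac, h⟩ := h; subst h; simpa using hac
    · subst h
      have hj := lastIdx_lt_length t c j h2
      simpa using ih j h2 hj

theorem le_lastIdx_of_getElem {α : Type} [DecidableEq α] (xs : List α) (c : α) (j : Nat)
    (hj : j < xs.length) (hc : xs[j] = c) : ∃ i, lastIdx xs c = some i ∧ j ≤ i := by
  induction xs generalizing j with
  | nil => simp at hj
  | cons a t ih =>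
    rw [lastIdx]
    cases j with
    | zero =>
      have hc0 : a = c := by simpa using hc
      rcases h2 : lastIdx t c with _ | i
      · exact ⟨0, by simp [hc0], by omega⟩
      · exact ⟨i + 1, rfl, by omega⟩
    | succ k =>
      obtain ⟨ii, hii, hki⟩ := ih k (by simpa using hj) (by simpa using hc)
      rw [hii]
      exact ⟨ii + 1, rfl, by omega⟩

theorem lastIdx_append_singleton_self {α : Type} [DecidableEq α] (xs : List α) (c : α) :
    lastIdx (xs ++ [c]) c = some xs.length := by
  induction xs with
  | nil => simp [lastIdx]
  | cons a t ih => simp [lastIdx, ih]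

theorem lastIdx_append_singleton_ne {α : Type} [DecidableEq α] (xs : List α) (c d : α)
    (h : d ≠ c) : lastIdx (xs ++ [c]) d = lastIdx xs d := by
  induction xs with
  | nil => simp [lastIdx, Ne.symm h]
  | cons a t ih => simp [lastIdx, ih]

theorem get?_erase_eq {κ ν : Type} [BEq κ] [LawfulBEq κ] [DecidableEq κ] (d : PySem.Dict κ ν) (k k' : κ) :
    (d.erase k).get? k' = if k' = k then none else d.get? k' := by
  rcases d with ⟨items⟩
  simp only [PySem.Dict.erase, PySem.Dict.get?]
  induction items with
  | nil => simp
  | cons p rest ih =>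
    by_cases h1 : p.1 = k <;> by_cases h2 : p.1 = k' <;> by_cases h3 : k' = k <;>
      simp_all [beq_iff_eq]

theorem findSeg_eq_find? (items : List (String × (Int × Int))) (r : Int) :
    findSeg items r =
      (items.find? (fun q => decide (q.2.1 ≤ r ∧ r ≤ q.2.2))).map (fun q => (q.1, q.2.1)) := by
  induction items with
  | nil => simp [findSeg]
  | cons p rest ih =>
    by_cases h : p.2.1 ≤ r ∧ r ≤ p.2.2 <;> simp [findSeg, List.find?, h, ih]

theorem dLookup_eq (segmentos : List (String × Int × Int)) (r : Int) :
    dLookup segmentos r = (findSeg (dictSegs segmentos).items r).map (fun q => q.1) := by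
  rw [dLookup, findSeg_eq_find?, Option.map_map, dictSegs]
  rfl

theorem getD_of_lt (xs : List Int) (n : Nat) (h : n < xs.length) : xs.getD n 0 = xs[n] := by
  simp [List.getD, List.getElem?_eq_getElem h]

-- the one-round page-fault step: A takes a frame from the queue (or evicts the FIFO victim),
-- B assigns marcos[fallos % L]; both agree and re-establish the invariant for hist ++ [clave]
theorem faultCore (items : List (String × (Int × Int))) (marcos : List Int)
    (hm : marcos ≠ []) (req : Int) (rest : List Int) (n : String) (b : Int)
    (hfind : findSeg items req = some (n, b)) (hn : ¬ n = "")
    (hist : List (String × Int)) (tp carga : PySem.Dict (String × Int) Int)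
    (htp : ∀ c, tp.get? c = (lastIdx hist c).elim none (fun i =>
        if (hist.length : Int) - (marcos.length : Int) ≤ (i : Int)
        then some (marcos.getD (i % marcos.length) 0) else none))
    (hca : ∀ c, carga.get? c = (lastIdx hist c).map (fun i => (i : Int)))
    (hnd : (hist.drop (hist.length - marcos.length)).Nodup)
    (htpc : tp.get? (n, PySem.Int.floordiv (req - b) 16) = none)
    (hnores : ∀ j (hj : j < hist.length),
        hist[j] = (n, PySem.Int.floordiv (req - b) 16) →
        ((j : Int) < (hist.length : Int) - (marcos.length : Int)))
    (hBstep : loopB items marcos (marcos.length : Int) (req :: rest) carga (hist.length : Int)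
      = (match PySem.List.pyGet? marcos (PySem.Int.mod (hist.length : Int) (marcos.length : Int)) with
         | none => []
         | some frame =>
           (req, frame * 16 + PySem.Int.mod (req - b) 16,
             if (hist.length : Int) < (marcos.length : Int) then "Marco libre asignado" else "Marco asignado")
             :: loopB items marcos (marcos.length : Int) rest
                  (carga.insert (n, PySem.Int.floordiv (req - b) 16) (hist.length : Int))
                  ((hist.length : Int) + 1)))
    (hIH : ∀ (hist' : List (String × Int)) (tp' carga' : PySem.Dict (String × Int) Int)
      (cola' : List Int) (fifo' : List (String × Int)) (fallos' : Int),
      cola' = marcos.drop hist'.length →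
      fifo' = hist'.drop (hist'.length - marcos.length) →
      fallos' = (hist'.length : Int) →
      (∀ c, tp'.get? c = (lastIdx hist' c).elim none (fun i =>
          if (hist'.length : Int) - (marcos.length : Int) ≤ (i : Int)
          then some (marcos.getD (i % marcos.length) 0) else none)) →
      (∀ c, carga'.get? c = (lastIdx hist' c).map (fun i => (i : Int))) →
      (hist'.drop (hist'.length - marcos.length)).Nodup →
      loopA items rest tp' cola' fifo' = loopB items marcos (marcos.length : Int) rest carga' fallos') :
    loopA items (req :: rest) tp (marcos.drop hist.length) (hist.drop (hist.length - marcos.length))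
      = loopB items marcos (marcos.length : Int) (req :: rest) carga (hist.length : Int) := by
  have hlen1 : 0 < marcos.length := List.length_pos_of_ne_nil hm
  rw [hBstep]
  simp only [loopA, hfind]
  rw [if_neg hn]
  simp only [htpc]
  by_cases hkl : hist.length < marcos.length
  · -- a free frame is left: A pops cola, B computes marcos[k % L] = marcos[k]
    have hdropA : marcos.drop hist.length = marcos[hist.length] :: marcos.drop (hist.length + 1) :=
      List.drop_eq_getElem_cons hkl
    simp only [hdropA]
    have hpgB : PySem.List.pyGet? marcos (PySem.Int.mod (hist.length : Int) (marcos.length : Int))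
        = some marcos[hist.length] := by
      rw [PySem.Int.mod_natCast, Nat.mod_eq_of_lt hkl, PySem.List.pyGet?_natCast,
        List.getElem?_eq_getElem hkl]
    simp only [hpgB]
    rw [if_pos (show ((hist.length : Int) < (marcos.length : Int)) by exact_mod_cast hkl)]
    have hsub0 : hist.length - marcos.length = 0 := Nat.sub_eq_zero_of_le (Nat.le_of_lt hkl)
    rw [hsub0, List.drop_zero]
    have hnotin : (n, PySem.Int.floordiv (req - b) 16) ∉ hist := by
      intro hmem
      obtain ⟨j, hj, he⟩ := List.getElem_of_mem hmem
      have := hnores j hj he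
      omega
    have ihe := hIH (hist ++ [(n, PySem.Int.floordiv (req - b) 16)])
      (tp.insert (n, PySem.Int.floordiv (req - b) 16) marcos[hist.length])
      (carga.insert (n, PySem.Int.floordiv (req - b) 16) (hist.length : Int))
      (marcos.drop (hist.length + 1))
      (hist ++ [(n, PySem.Int.floordiv (req - b) 16)])
      ((hist.length : Int) + 1)
      (by simp [List.length_append])
      (by simp [List.length_append, show hist.length + 1 - marcos.length = 0 from by omega])
      (by push_cast [List.length_append, List.length_singleton]; ring)
      (by
        intro c
        rw [PySem.Dict.get?_insert]
        simp only [List.length_append, List.length_singleton]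
        by_cases hc : c = (n, PySem.Int.floordiv (req - b) 16)
        · subst hc
          rw [if_pos rfl, lastIdx_append_singleton_self]
          simp only [Option.elim_some]
          rw [if_pos (by omega)]
          rw [Nat.mod_eq_of_lt hkl, getD_of_lt _ _ hkl]
        · rw [if_neg hc, htp c, lastIdx_append_singleton_ne _ _ _ hc]
          rcases hLj : lastIdx hist c with _ | j
          · rfl
          · simp only [Option.elim_some]
            have h0j : (0:Int) ≤ (j:Int) := Int.natCast_nonneg j
            rw [if_pos (by omega), if_pos (by omega)])
      (by
        intro c
        rw [PySem.Dict.get?_insert]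
        by_cases hc : c = (n, PySem.Int.floordiv (req - b) 16)
        · subst hc; rw [if_pos rfl, lastIdx_append_singleton_self]; rfl
        · rw [if_neg hc, hca c, lastIdx_append_singleton_ne _ _ _ hc])
      (by
        simp only [List.length_append, List.length_singleton]
        rw [show hist.length + 1 - marcos.length = 0 from by omega, List.drop_zero]
        refine List.Nodup.append ?_ (by simp) ?_
        · rw [hsub0, List.drop_zero] at hnd; exact hnd
        · intro a ha hb
          simp only [List.mem_singleton] at hb
          exact hnotin (hb ▸ ha))
    rw [ihe]
  · -- no free frame: A evicts the FIFO victim hist[k - L]; its frame is marcos[k % L]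
    have hklen : marcos.length ≤ hist.length := Nat.le_of_not_lt hkl
    have hdropnil : marcos.drop hist.length = [] := List.drop_eq_nil_of_le hklen
    simp only [hdropnil]
    have hvlt : hist.length - marcos.length < hist.length := by omega
    have hdropF : hist.drop (hist.length - marcos.length)
        = hist[hist.length - marcos.length] :: hist.drop ((hist.length - marcos.length) + 1) :=
      List.drop_eq_getElem_cons hvlt
    simp only [hdropF]
    obtain ⟨iv, hiv, hvle⟩ :=
      le_lastIdx_of_getElem hist (hist[hist.length - marcos.length]) (hist.length - marcos.length) hvlt rfl
    have hivlt := lastIdx_lt_length _ _ _ hiv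
    have hveq := lastIdx_getElem _ _ _ hiv hivlt
    have hivEq : iv = hist.length - marcos.length := by
      by_contra hne
      have hlt2 : hist.length - marcos.length < iv := by omega
      have hterm : (hist.length - marcos.length) + (iv - (hist.length - marcos.length)) = iv := by omega
      have e1 : (hist.drop (hist.length - marcos.length))[iv - (hist.length - marcos.length)]'
          (by simp only [List.length_drop]; omega) = hist[iv]'hivlt := by
        rw [List.getElem_drop]
        simp only [hterm]
      have e0 : (hist.drop (hist.length - marcos.length))[0]'(by simp only [List.length_drop]; omega)
          = hist[hist.length - marcos.length]'hvlt := by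
        rw [List.getElem_drop]
        simp only [Nat.add_zero]
      have hb1 : 0 < (hist.drop (hist.length - marcos.length)).length := by
        simp only [List.length_drop]; omega
      have hb2 : iv - (hist.length - marcos.length)
          < (hist.drop (hist.length - marcos.length)).length := by
        simp only [List.length_drop]; omega
      have : (0 : Nat) = iv - (hist.length - marcos.length) := by
        rw [← List.Nodup.getElem_inj_iff hnd (hi := hb1) (hj := hb2)]
        rw [e0, e1, hveq]
      omega
    have hliv : lastIdx hist (hist[hist.length - marcos.length])
        = some (hist.length - marcos.length) := hivEq ▸ hiv
    have hthv : (hist.length : Int) - (marcos.length : Int)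
        ≤ ((hist.length - marcos.length : Nat) : Int) := by omega
    have htpv : tp.get? (hist[hist.length - marcos.length])
        = some (marcos.getD ((hist.length - marcos.length) % marcos.length) 0) := by
      rw [htp _, hliv]
      simp only [Option.elim_some]
      rw [if_pos hthv]
    simp only [htpv]
    have hmodeq : (hist.length - marcos.length) % marcos.length = hist.length % marcos.length :=
      (Nat.mod_eq_sub_mod hklen).symm
    have hmlt : hist.length % marcos.length < marcos.length := Nat.mod_lt _ hlen1
    have hpgB : PySem.List.pyGet? marcos (PySem.Int.mod (hist.length : Int) (marcos.length : Int))
        = some marcos[hist.length % marcos.length] := by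
      rw [PySem.Int.mod_natCast, PySem.List.pyGet?_natCast, List.getElem?_eq_getElem hmlt]
    simp only [hpgB]
    rw [if_neg (show ¬((hist.length : Int) < (marcos.length : Int)) by omega)]
    simp only [hmodeq, getD_of_lt _ _ hmlt]
    have hvne : hist[hist.length - marcos.length] ≠ (n, PySem.Int.floordiv (req - b) 16) := by
      intro he
      rw [he, htpc] at htpv
      simp at htpv
    have ihe := hIH (hist ++ [(n, PySem.Int.floordiv (req - b) 16)])
      ((tp.erase (hist[hist.length - marcos.length])).insert
        (n, PySem.Int.floordiv (req - b) 16) marcos[hist.length % marcos.length])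
      (carga.insert (n, PySem.Int.floordiv (req - b) 16) (hist.length : Int))
      []
      (hist.drop ((hist.length - marcos.length) + 1) ++ [(n, PySem.Int.floordiv (req - b) 16)])
      ((hist.length : Int) + 1)
      (by
        symm
        apply List.drop_eq_nil_of_le
        simp only [List.length_append, List.length_singleton]
        omega)
      (by
        simp only [List.length_append, List.length_singleton]
        rw [show hist.length + 1 - marcos.length = (hist.length - marcos.length) + 1 from by omega]
        rw [List.drop_append_of_le_length (by omega)])
      (by push_cast [List.length_append, List.length_singleton]; ring)
      (by
        intro c
        simp only [List.length_append, List.length_singleton]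
        rw [PySem.Dict.get?_insert, get?_erase_eq]
        by_cases hc : c = (n, PySem.Int.floordiv (req - b) 16)
        · subst hc
          rw [if_pos rfl, lastIdx_append_singleton_self]
          simp only [Option.elim_some]
          rw [if_pos (by omega)]
          rw [getD_of_lt _ _ hmlt]
        · rw [if_neg hc, lastIdx_append_singleton_ne _ _ _ hc]
          by_cases hv : c = hist[hist.length - marcos.length]
          · rw [if_pos hv]
            subst hv
            rw [hliv]
            simp only [Option.elim_some]
            rw [if_neg (by omega)]
          · rw [if_neg hv, htp c]
            rcases hLj : lastIdx hist c with _ | j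
            · rfl
            · simp only [Option.elim_some]
              have hjlt := lastIdx_lt_length _ _ _ hLj
              have hjne : j ≠ hist.length - marcos.length := by
                intro he
                apply hv
                have hje := lastIdx_getElem _ _ _ hLj hjlt
                subst he
                exact hje.symm
              by_cases hcond : (hist.length : Int) - (marcos.length : Int) ≤ (j : Int)
              · rw [if_pos hcond, if_pos (by omega)]
              · rw [if_neg hcond, if_neg (by omega)])
      (by
        intro c
        rw [PySem.Dict.get?_insert]
        by_cases hc : c = (n, PySem.Int.floordiv (req - b) 16)
        · subst hc; rw [if_pos rfl, lastIdx_append_singleton_self]; rfl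
        · rw [if_neg hc, hca c, lastIdx_append_singleton_ne _ _ _ hc])
      (by
        simp only [List.length_append, List.length_singleton]
        rw [show hist.length + 1 - marcos.length = (hist.length - marcos.length) + 1 from by omega]
        rw [List.drop_append_of_le_length (by omega)]
        refine List.Nodup.append ?_ (by simp) ?_
        · have hndc : (hist.drop (hist.length - marcos.length)).Nodup := hnd
          rw [hdropF] at hndc
          exact hndc.of_cons
        · intro a ha hb
          simp only [List.mem_singleton] at hb
          subst hb
          obtain ⟨j, hj, he⟩ := List.getElem_of_mem ha
          have hjlen : (hist.length - marcos.length) + 1 + j < hist.length := by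
            simp only [List.length_drop] at hj
            omega
          rw [List.getElem_drop] at he
          have := hnores _ hjlen he
          omega)
    rw [ihe]

-- the full simulation: A's (tabla_paginas, cola_marcos, uso_fifo) state and B's (carga, fallos)
-- state produce the same output
theorem simLoop (items : List (String × (Int × Int))) (marcos : List Int) (hm : marcos ≠ [])
    (reqs : List Int) :
    ∀ (hist : List (String × Int)) (tp carga : PySem.Dict (String × Int) Int)
      (cola : List Int) (fifo : List (String × Int)) (fallos : Int),
      cola = marcos.drop hist.length →
      fifo = hist.drop (hist.length - marcos.length) →
      fallos = (hist.length : Int) →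
      (∀ c, tp.get? c = (lastIdx hist c).elim none (fun i =>
          if (hist.length : Int) - (marcos.length : Int) ≤ (i : Int)
          then some (marcos.getD (i % marcos.length) 0) else none)) →
      (∀ c, carga.get? c = (lastIdx hist c).map (fun i => (i : Int))) →
      (hist.drop (hist.length - marcos.length)).Nodup →
      loopA items reqs tp cola fifo = loopB items marcos (marcos.length : Int) reqs carga fallos := by
  induction reqs with
  | nil =>
    intro hist tp carga cola fifo fallos hcola hfifo hfal htp hca hnd
    rfl
  | cons req rest ih =>
    intro hist tp carga cola fifo fallos hcola hfifo hfal htp hca hnd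
    subst hcola hfifo hfal
    have hlen1 : 0 < marcos.length := List.length_pos_of_ne_nil hm
    rcases hfind : findSeg items req with _ | ⟨n, b⟩
    · simp only [loopA, loopB, hfind]
    · by_cases hn : n = ""
      · subst hn
        simp only [loopA, loopB, hfind, if_true]
      · rcases hli : lastIdx hist (n, PySem.Int.floordiv (req - b) 16) with _ | i
        · -- page never loaded: fault
          have htpc : tp.get? (n, PySem.Int.floordiv (req - b) 16) = none := by
            rw [htp _, hli]; rfl
          have hcac : carga.get? (n, PySem.Int.floordiv (req - b) 16) = none := by
            rw [hca _, hli]; rfl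
          have hnores : ∀ j (hj : j < hist.length),
              hist[j] = (n, PySem.Int.floordiv (req - b) 16) →
              ((j : Int) < (hist.length : Int) - (marcos.length : Int)) := by
            intro j hj he
            exact absurd (he ▸ List.getElem_mem hj) ((lastIdx_eq_none_iff hist _).mp hli)
          exact faultCore items marcos hm req rest n b hfind hn hist tp carga htp hca hnd
            htpc hnores (by simp only [loopB, hfind, hcac]; rw [if_neg hn]) ih
        · by_cases hth : (hist.length : Int) - (marcos.length : Int) ≤ (i : Int)
          · -- resident page: hit in both
            have htpc : tp.get? (n, PySem.Int.floordiv (req - b) 16)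
                = some (marcos.getD (i % marcos.length) 0) := by
              rw [htp _, hli]
              simp only [Option.elim_some]
              rw [if_pos hth]
            have hcac : carga.get? (n, PySem.Int.floordiv (req - b) 16) = some (i : Int) := by
              rw [hca _, hli]; rfl
            simp only [loopA, loopB, hfind]
            rw [if_neg hn, if_neg hn]
            simp only [htpc, hcac]
            rw [if_pos hth]
            have hmlt : i % marcos.length < marcos.length := Nat.mod_lt _ hlen1
            have hpg : PySem.List.pyGet? marcos (PySem.Int.mod (i : Int) (marcos.length : Int))
                = some marcos[i % marcos.length] := by
              rw [PySem.Int.mod_natCast, PySem.List.pyGet?_natCast, List.getElem?_eq_getElem hmlt]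
            simp only [hpg]
            simp only [getD_of_lt _ _ hmlt]
            rw [ih hist tp carga _ _ _ rfl rfl rfl htp hca hnd]
          · -- stale entry: evicted page, fault again
            have htpc : tp.get? (n, PySem.Int.floordiv (req - b) 16) = none := by
              rw [htp _, hli]
              simp only [Option.elim_some]
              rw [if_neg hth]
            have hcac : carga.get? (n, PySem.Int.floordiv (req - b) 16) = some (i : Int) := by
              rw [hca _, hli]; rfl
            have hnores : ∀ j (hj : j < hist.length),
                hist[j] = (n, PySem.Int.floordiv (req - b) 16) →
                ((j : Int) < (hist.length : Int) - (marcos.length : Int)) := by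
              intro j hj he
              obtain ⟨i2, hi2, hji⟩ := le_lastIdx_of_getElem hist _ j hj he
              rw [hli] at hi2
              have hval : i2 = i := (Option.some.inj hi2).symm
              omega
            exact faultCore items marcos hm req rest n b hfind hn hist tp carga htp hca hnd
              htpc hnores (by simp only [loopB, hfind, hcac]; rw [if_neg hn, if_neg hth]) ih

-- ===== VERDICT (by name: the statement is the Claim_ definition above) =====
theorem procesar_spec : Claim_equal_procesar := by
  intro segs reqs marcos hdom hpre
  by_cases hm : marcos = []
  · subst hm
    rcases hpre with h | h | h
    · exact absurd rfl h
    · subst h; rfl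
    · rcases reqs with _ | ⟨r, rest⟩
      · rfl
      · simp only [List.head?_cons, Option.all_some] at h
        have he := dLookup_eq segs r
        show loopA _ (r :: rest) _ _ _ = loopB _ _ _ (r :: rest) _ _
        rcases hfs : findSeg (dictSegs segs).items r with _ | ⟨n, b⟩
        · simp only [loopA, loopB, hfs]
        · rw [hfs] at he
          have hn : n = "" := by
            rw [he] at h
            simpa using h
          subst hn
          simp only [loopA, loopB, hfs, if_true]
  · exact simLoop (dictSegs segs).items marcos hm reqs [] PySem.Dict.empty PySem.Dict.empty
      marcos [] 0 (by simp) (by simp) (by simp)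
      (by intro c; simp [PySem.Dict.get?_empty, lastIdx])
      (by intro c; simp [PySem.Dict.get?_empty, lastIdx])
      (by simp)
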